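-- pv_equiv track=rewrite | github.com/Plawn/petit_publipost_gateway | app/better_publiposting/utils.py | xml_cleaner
-- ===== SOURCE A (Python) =====
-- from typing import Dict, List, Generator, Iterable
--
-- def xml_cleaner(words: Iterable) -> Generator[str, None, None]:
--     """Enlève les tags XML résiduels pour une liste de mots"""
--     for word in words:
--         cleaned_word = ""
--         in_tag = False
--         for j in range(len(word)):
--             if word[j] == "<":
--                 in_tag = True
--             elif word[j] == ">":
--                 in_tag = False
--             elif not in_tag:
--                 cleaned_word += word[j]
--         yield cleaned_word
-- ===== SOURCE B (Python) =====
-- def xml_cleaner(words):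
--     """Enlève les tags XML résiduels pour une liste de mots"""
--     for word in words:
--         head, *tags = word.split('<')
--         yield (head + ''.join(t.partition('>')[2] for t in tags)).replace('>', '')
-- ===== Notes on version B (the rewrite author's own statement) =====
-- stated objective: simpler
-- what changed: Replaced the per-character in_tag state machine by a closed-form string decomposition: split each word on '<', keep only what follows the first '>' of each tag segment, then drop stray '>' characters.
import Mathlib
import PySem

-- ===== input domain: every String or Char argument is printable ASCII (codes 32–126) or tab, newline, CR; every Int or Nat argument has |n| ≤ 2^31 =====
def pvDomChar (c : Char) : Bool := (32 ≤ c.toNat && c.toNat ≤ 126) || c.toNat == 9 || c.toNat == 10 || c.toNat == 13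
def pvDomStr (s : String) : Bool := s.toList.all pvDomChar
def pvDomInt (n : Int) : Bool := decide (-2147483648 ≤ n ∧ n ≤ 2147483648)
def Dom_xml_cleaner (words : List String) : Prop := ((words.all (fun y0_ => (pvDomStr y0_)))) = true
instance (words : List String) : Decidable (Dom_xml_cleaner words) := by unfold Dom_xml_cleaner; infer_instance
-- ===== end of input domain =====

-- B replaces A's per-character in_tag state machine by a split-on-'<' closed form (objective: simpler).
-- A is a generator; both sides are compared as the list of yielded strings.

-- ===== PORT A =====
-- inner loop of A: fold over the characters of the word with state (cleaned_word, in_tag)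
def xmlCleanStep (st : List Char × Bool) (c : Char) : List Char × Bool :=
  if c = '<' then (st.1, true)
  else if c = '>' then (st.1, false)
  else if !st.2 then (st.1 ++ [c], st.2)
  else st

def xml_cleaner (words : List String) : List String :=
  words.map (fun word => String.mk (word.toList.foldl xmlCleanStep ([], false)).1)

-- ===== PORT B =====
-- hand port of word.split('<') as (head, tail segments); exact for a one-char separator
def splitLt : List Char → List Char × List (List Char)
  | [] => ([], [])
  | c :: rest =>
    let r := splitLt rest
    if c = '<' then ([], r.1 :: r.2) else (c :: r.1, r.2)

-- hand port of t.partition('>')[2]: everything after the first '>' ('' if none); exact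
def afterGt (t : List Char) : List Char := (t.dropWhile (· ≠ '>')).drop 1

-- hand port of s.replace('>', ''); exact for one-char old and empty new
def dropGt (s : List Char) : List Char := s.filter (· ≠ '>')

def xml_cleaner_alt (words : List String) : List String :=
  words.map (fun word =>
    let p := splitLt word.toList
    String.mk (dropGt (p.1 ++ (p.2.map afterGt).flatten)))

-- ===== PRECONDITION & SPEC =====
def Spec_xml_cleaner (words : List String) (out : List String) : Prop := out = xml_cleaner_alt words
instance (words : List String) (out : List String) : Decidable (Spec_xml_cleaner words out) := by unfold Spec_xml_cleaner; infer_instance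

-- ===== CLAIM (what is proved, stated in full; the proofs are below) =====
def Claim_equal_xml_cleaner : Prop := ∀ (words : List String), Dom_xml_cleaner words → Spec_xml_cleaner words (xml_cleaner words)

-- ===== LEMMAS AND PROOFS =====

-- accumulator-free form of A's inner loop
def cleanRec : List Char → Bool → List Char
  | [], _ => []
  | c :: r, tag =>
    if c = '<' then cleanRec r true
    else if c = '>' then cleanRec r false
    else if tag then cleanRec r tag
    else c :: cleanRec r tag

theorem foldl_xmlCleanStep (cs : List Char) (acc : List Char) (tag : Bool) :
    (cs.foldl xmlCleanStep (acc, tag)).1 = acc ++ cleanRec cs tag := by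
  induction cs generalizing acc tag with
  | nil => simp [cleanRec]
  | cons c r ih =>
    by_cases h1 : c = '<'
    · simp [List.foldl, xmlCleanStep, cleanRec, h1, ih]
    · by_cases h2 : c = '>'
      · simp [List.foldl, xmlCleanStep, cleanRec, h1, h2, ih]
      · cases tag with
        | true => simp [List.foldl, xmlCleanStep, cleanRec, h1, h2, ih]
        | false => simp [List.foldl, xmlCleanStep, cleanRec, h1, h2, ih]

-- the two char-level cleaners agree, for both starting states of the flag
theorem cleanRec_eq_split (cs : List Char) :
    cleanRec cs false = dropGt ((splitLt cs).1 ++ ((splitLt cs).2.map afterGt).flatten) ∧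
    cleanRec cs true = dropGt (afterGt (splitLt cs).1 ++ ((splitLt cs).2.map afterGt).flatten) := by
  induction cs with
  | nil => simp [cleanRec, splitLt, afterGt, dropGt]
  | cons c r ih =>
    by_cases h1 : c = '<'
    · simp [cleanRec, splitLt, afterGt, h1, ih.2, dropGt]
    · by_cases h2 : c = '>'
      · simp [cleanRec, splitLt, afterGt, dropGt, h1, h2, ih.1]
      · constructor
        · simp [cleanRec, splitLt, dropGt, h1, h2, ih.1]
        · simp [cleanRec, splitLt, afterGt, dropGt, h1, h2, ih.2]

-- ===== VERDICT (by name: the statement is the Claim_ definition above) =====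
theorem xml_cleaner_spec : Claim_equal_xml_cleaner := by
  intro words _
  unfold Spec_xml_cleaner xml_cleaner xml_cleaner_alt
  refine List.map_congr_left (fun w _ => ?_)
  rw [foldl_xmlCleanStep]
  simp [(cleanRec_eq_split w.toList).1]
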